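-- pv_equiv track=rewrite | github.com/simlav000/Fall2024 | COMP321/HW12/ternian.py | ternarian_weights
-- ===== SOURCE A (Python) =====
-- def ternarian_weights(t_weight):
--     results = []
--     for weight in t_weight:
--         left_pan = []
--         right_pan = []
--         power = 0
--
--         while weight != 0:
--             remainder = weight % 3
--             if remainder == 1:
--                 right_pan.append(3**power)
--                 weight -= 1
--             elif remainder == 2:
--                 left_pan.append(3**power)
--                 weight += 1
--             weight //= 3
--             power += 1
--
--         results.append((sorted(left_pan, reverse=True), sorted(right_pan, reverse=True)))
--
--     return results
-- ===== SOURCE B (Python) =====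
-- def ternarian_weights(t_weight):
--     # Offset trick: shift w by m = (3**k - 1)//2 so that the balanced-ternary
--     # digits of w are the ordinary base-3 digits of w + m, each minus 1.
--     # No +/-1 carry adjustments, no sort: prepending while extracting least
--     # significant digits yields each pan already in descending order.
--     results = []
--     for w in t_weight:
--         k = 0
--         while 3 ** k <= 2 * abs(w):
--             k += 1
--         n = w + (3 ** k - 1) // 2  # now 0 <= n < 3**k
--         left, right = [], []
--         for p in range(k):
--             n, d = divmod(n, 3)
--             if d == 0:                 # balanced digit -1
--                 left = [3 ** p] + left
--             elif d == 2:               # balanced digit +1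
--                 right = [3 ** p] + right
--         results.append((left, right))
--     return results
-- ===== Notes on version B (the rewrite author's own statement) =====
-- stated objective: alternative
-- what changed: A builds balanced ternary per weight with an interleaved while-loop of +/-1 carry adjustments and then sorts each pan; B instead shifts the weight by (3**k-1)//2 so plain base-3 digit extraction (digit-1 = balanced digit) applies, and builds each pan already in descending order by prepending, with no carry adjustments and no sort.
import Mathlib
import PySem

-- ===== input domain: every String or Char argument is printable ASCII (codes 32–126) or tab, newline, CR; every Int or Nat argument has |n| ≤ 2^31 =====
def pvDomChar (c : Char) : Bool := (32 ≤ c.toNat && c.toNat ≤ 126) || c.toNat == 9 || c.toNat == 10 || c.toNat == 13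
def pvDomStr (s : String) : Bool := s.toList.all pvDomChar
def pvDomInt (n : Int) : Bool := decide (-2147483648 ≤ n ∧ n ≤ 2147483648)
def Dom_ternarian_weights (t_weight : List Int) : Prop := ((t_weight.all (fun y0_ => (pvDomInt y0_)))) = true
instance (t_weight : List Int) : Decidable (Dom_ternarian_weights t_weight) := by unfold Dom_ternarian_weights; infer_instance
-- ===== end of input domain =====

-- B replaces A's carry-adjusting balanced-ternary loop + per-pan sort by the offset
-- trick (shift by (3^k-1)/2, take plain base-3 digits, prepend) — alternative algorithm.

-- ===== PORT A =====
-- A's while-loop: state (weight, power, left_pan, right_pan); appends 3^power to a pan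
-- and updates weight exactly as the Python does. 'fuel' only bounds the iteration count
-- (|w| strictly decreases each turn, so fuel = w.natAbs suffices); it never alters a step.
def pvLoopA (fuel : Nat) (w : Int) (power : Nat) (left right : List Int) : List Int × List Int :=
  match fuel with
  | 0 => (left, right)
  | fuel + 1 =>
    if w = 0 then (left, right)
    else if PySem.Int.mod w 3 = 1 then
      pvLoopA fuel (PySem.Int.floordiv (w - 1) 3) (power + 1) left (right ++ [(3:Int) ^ power])
    else if PySem.Int.mod w 3 = 2 then
      pvLoopA fuel (PySem.Int.floordiv (w + 1) 3) (power + 1) (left ++ [(3:Int) ^ power]) right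
    else
      pvLoopA fuel (PySem.Int.floordiv w 3) (power + 1) left right

def ternarian_weights (t_weight : List Int) : List (List Int × List Int) :=
  t_weight.map (fun weight =>
    let p := pvLoopA weight.natAbs weight 0 [] []
    (PySem.List.sorted p.1 (fun x => x) true, PySem.List.sorted p.2 (fun x => x) true))

-- ===== PORT B =====
-- B's 'while 3**k <= 2*abs(w): k += 1'; fuel only bounds the iterations (k ≤ 2|w| always,
-- since 3^k > k), it never alters a step.
def pvFindK (fuel : Nat) (w : Int) (k : Nat) : Nat :=
  match fuel with
  | 0 => k
  | fuel + 1 => if (3:Int) ^ k ≤ 2 * (w.natAbs : Int) then pvFindK fuel w (k + 1) else k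

-- B's 'for p in range(k)' loop: n, d = divmod(n, 3); prepend 3**p to a pan on d = 0 / 2.
def pvLoopB (k : Nat) (n : Int) (p : Nat) (left right : List Int) : List Int × List Int :=
  match k with
  | 0 => (left, right)
  | k + 1 =>
    let d := PySem.Int.mod n 3
    let n' := PySem.Int.floordiv n 3
    if d = 0 then pvLoopB k n' (p + 1) ((3:Int) ^ p :: left) right
    else if d = 2 then pvLoopB k n' (p + 1) left ((3:Int) ^ p :: right)
    else pvLoopB k n' (p + 1) left right

def ternarian_weights_alt (t_weight : List Int) : List (List Int × List Int) :=
  t_weight.map (fun w =>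
    let k := pvFindK (2 * w.natAbs + 1) w 0
    let n := w + PySem.Int.floordiv ((3:Int) ^ k - 1) 2
    pvLoopB k n 0 [] [])

-- ===== PRECONDITION & SPEC =====
def Spec_ternarian_weights (t_weight : List Int) (out : List (List Int × List Int)) : Prop := out = ternarian_weights_alt t_weight
instance (t_weight : List Int) (out : List (List Int × List Int)) : Decidable (Spec_ternarian_weights t_weight out) := by unfold Spec_ternarian_weights; infer_instance

-- ===== CLAIM (what is proved, stated in full; the proofs are below) =====
def Claim_equal_ternarian_weights : Prop := ∀ (t_weight : List Int), Dom_ternarian_weights t_weight → Spec_ternarian_weights t_weight (ternarian_weights t_weight)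

-- ===== LEMMAS AND PROOFS =====

-- proof helpers: the LSB-first balanced-ternary digit list of w (exactly k digits),
-- and the ascending pan selected from a digit list, powers starting at p
def pvBdig (k : Nat) (w : Int) : List Int :=
  match k with
  | 0 => []
  | k + 1 => ((w + 1) % 3 - 1) :: pvBdig k ((w - ((w + 1) % 3 - 1)) / 3)

def pvSel (ds : List Int) (target : Int) (p : Nat) : List Int :=
  match ds with
  | [] => []
  | d :: t => (if d = target then [(3:Int) ^ p] else []) ++ pvSel t target (p + 1)

lemma pvSel_bdig_zero : ∀ (k : Nat) (t : Int) (p : Nat), t ≠ 0 →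
    pvSel (pvBdig k 0) t p = [] := by
  intro k
  induction k with
  | zero => intro t p ht; simp [pvBdig, pvSel]
  | succ k ih =>
    intro t p ht
    have h1 : ((0:Int) + 1) % 3 - 1 = 0 := by decide
    simp only [pvBdig, h1]
    have h2 : ((0:Int) - 0) / 3 = 0 := by decide
    rw [h2]
    simp only [pvSel, ih t (p+1) ht]
    simp [ht.symm]

lemma pvLoopA_eq_sel : ∀ (fuel : Nat) (w : Int), w.natAbs ≤ fuel → ∀ p l r,
    pvLoopA fuel w p l r =
      (l ++ pvSel (pvBdig fuel w) (-1) p, r ++ pvSel (pvBdig fuel w) 1 p) := by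
  intro fuel
  induction fuel with
  | zero =>
    intro w hfw p l r
    have hw : w = 0 := by omega
    subst hw
    simp [pvLoopA, pvBdig, pvSel]
  | succ fuel ih =>
    intro w hfw p l r
    by_cases hw : w = 0
    · subst hw
      simp [pvLoopA, pvSel_bdig_zero]
    · rw [pvLoopA]
      simp only [if_neg hw]
      have hm3 : PySem.Int.mod w 3 = w % 3 :=
        PySem.Int.mod_eq_emod_of_pos (b := 3) (a := w) (by omega)
      have hwd : w % 3 = 3 * (w / 3) + w % 3 - 3 * (w / 3) := by ring
      have hd3 : w = 3 * (w / 3) + w % 3 := by omega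
      have hr0 : 0 ≤ w % 3 := Int.emod_nonneg w (by omega)
      have hr3 : w % 3 < 3 := Int.emod_lt_of_pos w (by omega)
      have hm1 : (w + 1) % 3 = (w % 3 + 1) % 3 := by
        conv_lhs => rw [hd3]
        omega
      by_cases h1 : PySem.Int.mod w 3 = 1
      · rw [if_pos h1]
        rw [hm3] at h1
        have hdig : (w + 1) % 3 - 1 = 1 := by rw [hm1, h1]; decide
        rw [pvBdig, hdig]
        have hfd : PySem.Int.floordiv (w - 1) 3 = (w - 1) / 3 :=
          PySem.Int.floordiv_eq_ediv_of_pos (by omega)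
        have hrec : ((w - 1) / 3).natAbs ≤ fuel := by omega
        rw [hfd, ih _ hrec]
        simp [pvSel]
      · rw [if_neg h1]
        rw [hm3] at h1
        by_cases h2 : PySem.Int.mod w 3 = 2
        · rw [if_pos h2]
          rw [hm3] at h2
          have hdig : (w + 1) % 3 - 1 = -1 := by rw [hm1, h2]; decide
          rw [pvBdig, hdig]
          rw [show (w - (-1 : Int)) = w + 1 from by ring]
          have hfd : PySem.Int.floordiv (w + 1) 3 = (w + 1) / 3 :=
            PySem.Int.floordiv_eq_ediv_of_pos (by omega)
          have hrec : ((w + 1) / 3).natAbs ≤ fuel := by omega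
          rw [hfd, ih _ hrec]
          simp [pvSel]
        · rw [if_neg h2]
          rw [hm3] at h2
          have hr : w % 3 = 0 := by omega
          have hdig : (w + 1) % 3 - 1 = 0 := by rw [hm1, hr]; decide
          rw [pvBdig, hdig]
          rw [show (w - (0 : Int)) = w from by ring]
          have hfd : PySem.Int.floordiv w 3 = w / 3 :=
            PySem.Int.floordiv_eq_ediv_of_pos (by omega)
          have hrec : (w / 3).natAbs ≤ fuel := by omega
          rw [hfd, ih _ hrec]
          simp [pvSel]

lemma mem_pvSel : ∀ (ds : List Int) (t : Int) (p : Nat) (x : Int),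
    x ∈ pvSel ds t p → ∃ q, p ≤ q ∧ x = (3:Int) ^ q := by
  intro ds
  induction ds with
  | nil => intro t p x hx; simp [pvSel] at hx
  | cons d tl ih =>
    intro t p x hx
    simp only [pvSel, List.mem_append] at hx
    rcases hx with hx | hx
    · refine ⟨p, le_refl p, ?_⟩
      by_cases hd : d = t <;> simp [hd] at hx
      exact hx
    · obtain ⟨q, hq, hxq⟩ := ih t (p + 1) x hx
      exact ⟨q, by omega, hxq⟩

lemma pvSel_pairwise : ∀ (ds : List Int) (t : Int) (p : Nat),
    (pvSel ds t p).Pairwise (· < ·) := by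
  intro ds
  induction ds with
  | nil => intro t p; simp [pvSel]
  | cons d tl ih =>
    intro t p
    simp only [pvSel]
    refine List.pairwise_append.mpr ⟨?_, ih t (p + 1), ?_⟩
    · by_cases hd : d = t <;> simp [hd]
    · intro a ha b hb
      obtain ⟨q, hq, hbq⟩ := mem_pvSel tl t (p + 1) b hb
      by_cases hd : d = t <;> simp [hd] at ha
      subst ha hbq
      exact pow_lt_pow_right₀ (by norm_num) (by omega)

lemma sorted_rev_pvSel (ds : List Int) (t : Int) :
    PySem.List.sorted (pvSel ds t 0) (fun x => x) true = (pvSel ds t 0).reverse := by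
  refine PySem.List.sorted_rev_eq_of_perm_of_pairwise_gt _ _ _ (List.reverse_perm _) ?_
  exact List.pairwise_reverse.mpr (pvSel_pairwise ds t 0)

lemma pvLoopB_eq_sel : ∀ (k : Nat) (w : Int) (p : Nat) (l r : List Int),
    pvLoopB k (w + ((3:Int) ^ k - 1) / 2) p l r =
      ((pvSel (pvBdig k w) (-1) p).reverse ++ l, (pvSel (pvBdig k w) 1 p).reverse ++ r) := by
  intro k
  induction k with
  | zero => intro w p l r; simp [pvLoopB, pvBdig, pvSel]
  | succ k ih =>
    intro w p l r
    have hodd : Odd ((3:Int) ^ k) := Odd.pow ⟨1, by ring⟩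
    obtain ⟨m, hm⟩ := hodd
    have hpow : (3:Int) ^ (k + 1) = 3 * (3 ^ k) := by ring
    set n : Int := w + ((3:Int) ^ (k + 1) - 1) / 2 with hn
    have hn' : n = w + 3 * m + 1 := by
      rw [hn, hpow, hm]; omega
    have hmod : PySem.Int.mod n 3 = n % 3 :=
      PySem.Int.mod_eq_emod_of_pos (by omega)
    have hfd : PySem.Int.floordiv n 3 = n / 3 :=
      PySem.Int.floordiv_eq_ediv_of_pos (by omega)
    have hnd : n = 3 * (n / 3) + n % 3 := by omega
    have hr0 : 0 ≤ n % 3 := Int.emod_nonneg n (by omega)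
    have hr3 : n % 3 < 3 := Int.emod_lt_of_pos n (by omega)
    have hw1 : (w + 1) % 3 = n % 3 := by
      have : w + 1 = n - 3 * m := by omega
      rw [this]
      omega
    set d : Int := (w + 1) % 3 - 1 with hd
    set w' : Int := (w - d) / 3 with hw'
    have hwd : w - d = 3 * w' := by
      have h0 : (w - d) % 3 = 0 := by omega
      omega
    have hrec : n / 3 = w' + ((3:Int) ^ k - 1) / 2 := by
      have hmk : ((3:Int) ^ k - 1) / 2 = m := by omega
      rw [hmk]; omega
    rw [pvLoopB]
    simp only [hmod, hfd]
    rw [pvBdig]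
    rw [← hd, ← hw', hrec]
    by_cases h0 : n % 3 = 0
    · have hdv : d = -1 := by omega
      rw [if_pos h0, hdv, ih w' (p + 1)]
      simp [pvSel]
    · rw [if_neg h0]
      by_cases h2 : n % 3 = 2
      · have hdv : d = 1 := by omega
        rw [if_pos h2, hdv, ih w' (p + 1)]
        simp [pvSel]
      · have hdv : d = 0 := by omega
        rw [if_neg h2, hdv, ih w' (p + 1)]
        simp [pvSel]

lemma pvBdig_sel_stable : ∀ (k j : Nat) (w : Int) (t : Int) (p : Nat), t ≠ 0 →
    w.natAbs ≤ j → 2 * w.natAbs < 3 ^ k →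
    pvSel (pvBdig k w) t p = pvSel (pvBdig j w) t p := by
  intro k
  induction k with
  | zero =>
    intro j w t p ht hj hk
    have hw : w = 0 := by simp [pow_zero] at hk; omega
    subst hw
    simp [pvBdig, pvSel, pvSel_bdig_zero j t p ht]
  | succ k ih =>
    intro j w t p ht hj hk
    by_cases hw : w = 0
    · subst hw
      rw [pvSel_bdig_zero (k+1) t p ht, pvSel_bdig_zero j t p ht]
    · obtain ⟨j', rfl⟩ : ∃ j', j = j' + 1 := ⟨j - 1, by omega⟩
      rw [pvBdig, pvBdig]
      simp only [pvSel]
      set d : Int := (w + 1) % 3 - 1 with hd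
      set w' : Int := (w - d) / 3 with hw'
      have hr0 : 0 ≤ (w + 1) % 3 := Int.emod_nonneg _ (by omega)
      have hr3 : (w + 1) % 3 < 3 := Int.emod_lt_of_pos _ (by omega)
      have hwd : w - d = 3 * w' := by
        have h0 : (w - d) % 3 = 0 := by
          have : (w + 1) % 3 = ((w + 1) % 3) % 3 := by omega
          omega
        omega
      have hoddk : Odd ((3:Int) ^ k) := Odd.pow ⟨1, by ring⟩
      obtain ⟨m, hm⟩ := hoddk
      have hpow : (3:Int) ^ (k + 1) = 3 * (3 ^ k) := by ring
      have hklt : 2 * (w.natAbs : Int) < (3:Int) ^ (k + 1) := by exact_mod_cast hk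
      have hrec1 : w'.natAbs ≤ j' := by
        have h1 : (w'.natAbs : Int) ≤ (w.natAbs : Int) - 1 := by
          rcases Int.natAbs_eq w with he | he <;> rcases Int.natAbs_eq w' with he' | he' <;> omega
        have h2 : (w.natAbs : Int) ≤ (j' : Int) + 1 := by exact_mod_cast hj
        omega
      have hrec2 : 2 * w'.natAbs < 3 ^ k := by
        have h1 : 2 * (w'.natAbs : Int) < (3:Int) ^ k := by
          have h3 : (3:Int) ^ (k+1) = 3 * (2 * m + 1) := by rw [hpow, hm]
          rcases Int.natAbs_eq w with he | he <;> rcases Int.natAbs_eq w' with he' | he' <;> omega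
        exact_mod_cast h1
      rw [ih j' w' t (p + 1) ht hrec1 hrec2]

lemma pvFindK_big : ∀ (fuel k : Nat) (w : Int), 2 * w.natAbs < 3 ^ k + fuel →
    2 * w.natAbs < 3 ^ (pvFindK fuel w k) := by
  intro fuel
  induction fuel with
  | zero => intro k w h; simpa [pvFindK] using h
  | succ fuel ih =>
    intro k w h
    rw [pvFindK]
    by_cases hle : (3:Int) ^ k ≤ 2 * (w.natAbs : Int)
    · rw [if_pos hle]
      apply ih
      have h1 : (3:Nat) ^ k ≤ 2 * w.natAbs := by exact_mod_cast hle
      have h2 : (3:Nat) ^ (k + 1) = 3 * 3 ^ k := by ring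
      have h3 : 1 ≤ (3:Nat) ^ k := Nat.one_le_pow _ _ (by norm_num)
      omega
    · rw [if_neg hle]
      have : 2 * (w.natAbs : Int) < (3:Int) ^ k := by omega
      exact_mod_cast this

-- ===== VERDICT (by name: the statement is the Claim_ definition above) =====
theorem ternarian_weights_spec : Claim_equal_ternarian_weights := by
  intro t_weight _
  unfold Spec_ternarian_weights ternarian_weights ternarian_weights_alt
  refine List.map_congr_left (fun w _ => ?_)
  set k : Nat := pvFindK (2 * w.natAbs + 1) w 0 with hk
  have hbig : 2 * w.natAbs < 3 ^ k :=
    pvFindK_big (2 * w.natAbs + 1) 0 w (by simp only [pow_zero]; omega)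
  have hA := pvLoopA_eq_sel w.natAbs w (le_refl _) 0 [] []
  have hfd : PySem.Int.floordiv ((3:Int) ^ k - 1) 2 = ((3:Int) ^ k - 1) / 2 :=
    PySem.Int.floordiv_eq_ediv_of_pos (by omega)
  have hB := pvLoopB_eq_sel k w 0 [] []
  simp only [hA, List.nil_append, hfd, hB, List.append_nil]
  rw [pvBdig_sel_stable k w.natAbs w (-1) 0 (by norm_num) (le_refl _) hbig,
      pvBdig_sel_stable k w.natAbs w 1 0 (by norm_num) (le_refl _) hbig]
  rw [sorted_rev_pvSel, sorted_rev_pvSel]
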